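-- pv_equiv track=rewrite | github.com/DaonanZhang/PEGNN_new | slurm_wrapper.py | check_status
-- ===== SOURCE A (Python) =====
-- def check_status(status):
--     rtn = 'RUNNING'
--
--     lines = status.split('\n')
--     for line in lines:
--         line = line.strip()
--         if line == '':
--             continue
--         if 'FAILED' in line:
--             rtn = 'FAILED'
--             break
--         elif 'COMPLETED' not in line:
--             rtn = 'PENDING'
--             break
--     else:
--         rtn = 'COMPLETED'
--
--     return rtn
-- ===== SOURCE B (Python) =====
-- def check_status(status):
--     lines = [l.strip() for l in status.split('\n')]
--     f = next((i for i, l in enumerate(lines) if 'FAILED' in l), None)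
--     p = next((i for i, l in enumerate(lines) if l and 'COMPLETED' not in l), None)
--     if f is None and p is None:
--         return 'COMPLETED'
--     if f is not None and (p is None or f <= p):
--         return 'FAILED'
--     return 'PENDING'
-- ===== Notes on version B (the rewrite author's own statement) =====
-- stated objective: alternative
-- what changed: Replaces A's single stateful early-break loop with two independent positional scans (first index of a FAILED line, first index of a non-empty line lacking COMPLETED) and an index comparison that decides the result, FAILED winning ties.
import Mathlib
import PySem

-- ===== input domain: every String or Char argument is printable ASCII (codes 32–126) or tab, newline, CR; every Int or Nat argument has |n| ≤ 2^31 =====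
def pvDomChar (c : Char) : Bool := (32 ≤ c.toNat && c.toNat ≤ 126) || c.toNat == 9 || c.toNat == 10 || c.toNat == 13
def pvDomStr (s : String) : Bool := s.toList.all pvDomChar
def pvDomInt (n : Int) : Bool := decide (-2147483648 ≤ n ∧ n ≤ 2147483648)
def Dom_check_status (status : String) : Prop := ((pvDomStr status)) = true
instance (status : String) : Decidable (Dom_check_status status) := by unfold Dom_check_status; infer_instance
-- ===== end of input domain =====

-- B replaces A's stateful early-break loop by two independent positional scans
-- (first FAILED line, first non-empty line lacking COMPLETED) compared by index.

-- ===== PORT A =====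
-- the for/else loop: falls off the end → "COMPLETED"; breaks with "FAILED"/"PENDING"
def checkLoopA : List String → String
  | [] => "COMPLETED"
  | l :: rest =>
    let line := PySem.Str.strip l
    if line = "" then checkLoopA rest
    else if PySem.Str.isIn "FAILED" line then "FAILED"
    else if !(PySem.Str.isIn "COMPLETED" line) then "PENDING"
    else checkLoopA rest

def check_status (status : String) : String :=
  checkLoopA ((PySem.Str.split? status "\n").getD [])

-- ===== PORT B =====
def check_status_alt (status : String) : String :=
  let lines := ((PySem.Str.split? status "\n").getD []).map PySem.Str.strip
  let f := lines.findIdx? (fun l => PySem.Str.isIn "FAILED" l)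
  let p := lines.findIdx? (fun l => decide (l ≠ "") && !(PySem.Str.isIn "COMPLETED" l))
  match f, p with
  | none, none => "COMPLETED"
  | some _, none => "FAILED"
  | none, some _ => "PENDING"
  | some i, some j => if i ≤ j then "FAILED" else "PENDING"

-- ===== PRECONDITION & SPEC =====
def Spec_check_status (status : String) (out : String) : Prop := out = check_status_alt status
instance (status : String) (out : String) : Decidable (Spec_check_status status out) := by unfold Spec_check_status; infer_instance

-- ===== CLAIM (what is proved, stated in full; the proofs are below) =====
def Claim_equal_check_status : Prop := ∀ (status : String), Dom_check_status status → Spec_check_status status (check_status status)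

-- ===== LEMMAS AND PROOFS =====

-- B's decision, abstracted over the stripped line list
def classifyB (ls : List String) : String :=
  match ls.findIdx? (fun l => PySem.Str.isIn "FAILED" l),
        ls.findIdx? (fun l => decide (l ≠ "") && !(PySem.Str.isIn "COMPLETED" l)) with
  | none, none => "COMPLETED"
  | some _, none => "FAILED"
  | none, some _ => "PENDING"
  | some i, some j => if i ≤ j then "FAILED" else "PENDING"

-- shifting both first-match indices by one does not change the decision
theorem shiftMatch (a b : Option Nat) :
    (match a.map (fun i => i + 1), b.map (fun i => i + 1) with
     | none, none => "COMPLETED"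
     | some _, none => "FAILED"
     | none, some _ => "PENDING"
     | some i, some j => if i ≤ j then "FAILED" else "PENDING")
    = (match a, b with
       | none, none => "COMPLETED"
       | some _, none => "FAILED"
       | none, some _ => "PENDING"
       | some i, some j => if i ≤ j then "FAILED" else "PENDING") := by
  cases a <;> cases b <;> simp

-- one step of B's decision: a FAILED line decides FAILED (ties included),
-- otherwise a non-empty line lacking COMPLETED decides PENDING, otherwise recurse
theorem classifyB_cons (x : String) (xs : List String) :
    classifyB (x :: xs) =
      (if PySem.Str.isIn "FAILED" x = true then "FAILED"
       else if (decide (x ≠ "") && !(PySem.Str.isIn "COMPLETED" x)) = true then "PENDING"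
       else classifyB xs) := by
  unfold classifyB
  simp only [List.findIdx?_cons]
  split_ifs with h1 h2 h2
  · rfl
  · cases xs.findIdx? (fun l => decide (l ≠ "") && !(PySem.Str.isIn "COMPLETED" l)) <;> rfl
  · cases xs.findIdx? (fun l => PySem.Str.isIn "FAILED" l) <;> simp
  · exact shiftMatch _ _

theorem checkLoopA_eq_classifyB (ls : List String) :
    checkLoopA ls = classifyB (ls.map PySem.Str.strip) := by
  induction ls with
  | nil => rfl
  | cons l rest ih =>
    rw [List.map_cons, classifyB_cons]
    simp only [checkLoopA]
    by_cases h0 : PySem.Str.strip l = ""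
    · rw [if_pos h0, h0]
      rw [if_neg (by decide : ¬ (PySem.Str.isIn "FAILED" "" = true))]
      rw [if_neg (by decide : ¬ ((decide (("" : String) ≠ "") && !(PySem.Str.isIn "COMPLETED" "")) = true))]
      exact ih
    · rw [if_neg h0]
      by_cases hf : PySem.Str.isIn "FAILED" (PySem.Str.strip l) = true
      · simp only [if_pos hf]
      · simp only [if_neg hf]
        by_cases hc : PySem.Str.isIn "COMPLETED" (PySem.Str.strip l) = true
        · have h1 : (!(PySem.Str.isIn "COMPLETED" (PySem.Str.strip l))) = false := by
            rw [hc]; rfl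
          have h2 : (decide (PySem.Str.strip l ≠ "") && !(PySem.Str.isIn "COMPLETED" (PySem.Str.strip l))) = false := by
            rw [hc]; simp
          simp only [h1, Bool.and_false, Bool.false_eq_true, if_false]
          exact ih
        · have hc' : PySem.Str.isIn "COMPLETED" (PySem.Str.strip l) = false :=
            Bool.eq_false_iff.mpr hc
          have h1 : (!(PySem.Str.isIn "COMPLETED" (PySem.Str.strip l))) = true := by
            rw [hc']; rfl
          have h2 : (decide (PySem.Str.strip l ≠ "") && !(PySem.Str.isIn "COMPLETED" (PySem.Str.strip l))) = true := by
            rw [hc']; simp [h0]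
          simp only [h1, Bool.and_true]
          rw [if_pos (show decide (PySem.Str.strip l ≠ "") = true by simp [h0])]
          simp

-- ===== VERDICT (by name: the statement is the Claim_ definition above) =====
theorem check_status_spec : Claim_equal_check_status := by
  intro status _
  unfold Spec_check_status check_status check_status_alt
  simpa [classifyB] using checkLoopA_eq_classifyB ((PySem.Str.split? status "\n").getD [])
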